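-- pv_equiv track=rewrite | github.com/mridulchamoli93/Python-Tools | Sorting-visualizations-main/sorting_gui_pyqt6.py | gen_bubble
-- ===== SOURCE A (Python) =====
-- def gen_bubble(arr):
--     A = arr.copy()
--     n = len(A)
--     if n <= 1:
--         yield A
--         return
--     for i in range(n-1):
--         for j in range(n-1-i):
--             if A[j] > A[j+1]:
--                 A[j], A[j+1] = A[j+1], A[j]
--                 yield A
-- ===== SOURCE B (Python) =====
-- def gen_bubble(arr):
--     A = arr.copy()
--     if len(A) <= 1:
--         yield A
--         return
--
--     def bubble(m):
--         if m <= 1: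
--             return
--         swapped = False
--         for j in range(m - 1):
--             if A[j] > A[j + 1]:
--                 A[j], A[j + 1] = A[j + 1], A[j]
--                 swapped = True
--                 yield A
--         if swapped:
--             yield from bubble(m - 1)
--
--     yield from bubble(len(A))
-- ===== Notes on version B (the rewrite author's own statement) =====
-- stated objective: alternative
-- what changed: Replaces the fixed (n-1)-pass nested index loop by a recursive bubble sort: a helper takes the shrinking bound m, does one swap pass, and recurses only while a pass still swapped (early exit on an already-sorted prefix); the observable yield sequence (references to the one shared list) is unchanged.
import Mathlib
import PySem

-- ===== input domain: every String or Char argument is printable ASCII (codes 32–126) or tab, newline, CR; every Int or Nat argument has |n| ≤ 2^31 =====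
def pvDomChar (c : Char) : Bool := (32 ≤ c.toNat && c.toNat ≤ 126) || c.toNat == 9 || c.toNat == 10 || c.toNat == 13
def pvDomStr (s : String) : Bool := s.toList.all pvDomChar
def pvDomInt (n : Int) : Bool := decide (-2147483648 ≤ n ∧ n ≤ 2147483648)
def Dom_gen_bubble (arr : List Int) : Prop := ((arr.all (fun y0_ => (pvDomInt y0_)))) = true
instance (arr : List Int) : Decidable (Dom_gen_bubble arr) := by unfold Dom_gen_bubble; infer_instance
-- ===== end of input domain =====

-- B replaces A's fixed (n-1)-pass nested index loop with a recursive bubble sort that stops as soon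
-- as a pass makes no swap (objective: alternative decomposition; same observable yield sequence).
-- NOTE on generator semantics: the Python generator yields the SAME shared list object after every
-- swap; a consumer that materialises it (list(gen_bubble(a))) therefore sees the FINAL state of the
-- list once per yield.  Both ports model exactly that observable value: they run their loops
-- literally, count the yields, and return the final list replicated once per yield.

-- ===== PORT A =====
-- loop body of A's inner 'for j in range(n-1-i)': compare A[j], A[j+1], swap and count one yield
def gen_bubble_step (st : List Int × Nat) (j : Int) : List Int × Nat :=
  let a := PySem.List.pyGetD st.1 j 0          -- A[j]  (j always in range here)
  let b := PySem.List.pyGetD st.1 (j + 1) 0    -- A[j+1]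
  if a > b then
    (PySem.List.pySetD (PySem.List.pySetD st.1 j b) (j + 1) a, st.2 + 1)
  else st

def gen_bubble (arr : List Int) : List (List Int) :=
  let A := arr
  let n : Int := A.length
  if n ≤ 1 then [A]
  else
    let st := (PySem.List.pyRange 0 (n - 1) 1).foldl
      (fun st i => (PySem.List.pyRange 0 (n - 1 - i) 1).foldl gen_bubble_step st) (A, 0)
    List.replicate st.2 st.1

-- ===== PORT B =====
-- loop body of B's pass: state also carries the 'swapped' flag
def gen_bubble_alt_step (st : List Int × Nat × Bool) (j : Int) : List Int × Nat × Bool :=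
  let a := PySem.List.pyGetD st.1 j 0
  let b := PySem.List.pyGetD st.1 (j + 1) 0
  if a > b then
    (PySem.List.pySetD (PySem.List.pySetD st.1 j b) (j + 1) a, st.2.1 + 1, true)
  else st

-- B's recursive helper 'bubble(m)': one pass over range(m-1), recurse on m-1 only if it swapped
def gen_bubble_alt_bubble (A : List Int) (cnt : Nat) (m : Nat) : List Int × Nat :=
  if h : m ≤ 1 then (A, cnt)
  else
    let st := (PySem.List.pyRange 0 ((m : Int) - 1) 1).foldl gen_bubble_alt_step (A, cnt, false)
    if st.2.2 then gen_bubble_alt_bubble st.1 st.2.1 (m - 1) else (st.1, st.2.1)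
termination_by m
decreasing_by omega

def gen_bubble_alt (arr : List Int) : List (List Int) :=
  let A := arr
  if A.length ≤ 1 then [A]
  else
    let st := gen_bubble_alt_bubble A 0 A.length
    List.replicate st.2 st.1

-- ===== PRECONDITION & SPEC =====
def Spec_gen_bubble (arr : List Int) (out : List (List Int)) : Prop := out = gen_bubble_alt arr
instance (arr : List Int) (out : List (List Int)) : Decidable (Spec_gen_bubble arr out) := by unfold Spec_gen_bubble; infer_instance

-- ===== CLAIM (what is proved, stated in full; the proofs are below) =====
def Claim_equal_gen_bubble : Prop := ∀ (arr : List Int), Dom_gen_bubble arr → Spec_gen_bubble arr (gen_bubble arr)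

-- ===== LEMMAS AND PROOFS =====

-- clean Nat-indexed model of one bubble pass over positions 0..b-1: final list and swap count
def passN : List Int → Nat → List Int × Nat
  | l, 0 => (l, 0)
  | l, b + 1 =>
    let p := passN l b
    let a := p.1.getD b 0
    let c := p.1.getD (b + 1) 0
    if a > c then ((p.1.set b c).set (b + 1) a, p.2 + 1) else p

-- clean model of A's pass schedule: passes with bounds m-1, m-2, …, 1, accumulating the count
def aRun : List Int × Nat → Nat → List Int × Nat
  | st, 0 => st
  | st, 1 => st
  | st, (m + 2) => aRun ((passN st.1 (m + 1)).1, st.2 + (passN st.1 (m + 1)).2) (m + 1)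

lemma cast_succ (b : Nat) : ((b : Int) + 1) = ((b + 1 : Nat) : Int) := by push_cast; ring

lemma foldA (b : Nat) : ∀ (l : List Int) (c : Nat),
    (PySem.List.pyRange 0 (b : Int) 1).foldl gen_bubble_step (l, c)
      = ((passN l b).1, c + (passN l b).2) := by
  induction b with
  | zero => intro l c; simp [PySem.List.pyRange_one_eq_nil, passN]
  | succ b ih =>
    intro l c
    rw [← cast_succ, PySem.List.pyRange_one_succ_right (by positivity), List.foldl_append]
    simp only [List.foldl, ih]
    simp only [gen_bubble_step, passN, cast_succ, PySem.List.pyGetD_natCast,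
      PySem.List.pySetD_natCast]
    split_ifs <;> (simp; try omega)

lemma foldB (b : Nat) : ∀ (l : List Int) (c : Nat) (f : Bool),
    (PySem.List.pyRange 0 (b : Int) 1).foldl gen_bubble_alt_step (l, c, f)
      = ((passN l b).1, c + (passN l b).2, f || decide ((passN l b).2 ≠ 0)) := by
  induction b with
  | zero => intro l c f; simp [PySem.List.pyRange_one_eq_nil, passN]
  | succ b ih =>
    intro l c f
    rw [← cast_succ, PySem.List.pyRange_one_succ_right (by positivity), List.foldl_append]
    simp only [List.foldl, ih]
    simp only [gen_bubble_alt_step, passN, cast_succ, PySem.List.pyGetD_natCast,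
      PySem.List.pySetD_natCast]
    split_ifs <;> (simp; try omega)

lemma pass_no_swap (b : Nat) : ∀ (l : List Int), (passN l b).2 = 0 →
    (passN l b).1 = l ∧ ∀ j, j < b → l.getD j 0 ≤ l.getD (j + 1) 0 := by
  induction b with
  | zero => intro l _; exact ⟨rfl, fun j hj => absurd hj (by omega)⟩
  | succ b ih =>
    intro l h
    simp only [passN] at h
    split_ifs at h with hc
    obtain ⟨h1, h2⟩ := ih l h
    rw [h1] at hc
    refine ⟨by simp only [passN]; rw [if_neg (by rw [h1]; exact hc)]; exact h1, ?_⟩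
    intro j hj
    rcases Nat.lt_succ_iff_lt_or_eq.mp hj with hj' | rfl
    · exact h2 j hj'
    · omega

lemma pass_sorted_id (b : Nat) : ∀ (l : List Int),
    (∀ j, j < b → l.getD j 0 ≤ l.getD (j + 1) 0) → passN l b = (l, 0) := by
  induction b with
  | zero => intro l _; rfl
  | succ b ih =>
    intro l h
    have hb : passN l b = (l, 0) := ih l (fun j hj => h j (by omega))
    have hle : l.getD b 0 ≤ l.getD (b + 1) 0 := h b (by omega)
    simp only [passN, hb]
    rw [if_neg (by omega)]

lemma aRun_sorted_id (m : Nat) : ∀ (st : List Int × Nat) (b : Nat),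
    (∀ j, j < b → st.1.getD j 0 ≤ st.1.getD (j + 1) 0) → m ≤ b + 1 → aRun st m = st := by
  induction m with
  | zero => intro st b _ _; rfl
  | succ m ih =>
    intro st b hs hm
    match m with
    | 0 => rfl
    | m + 1 =>
      simp only [aRun]
      rw [pass_sorted_id (m + 1) st.1 (fun j hj => hs j (by omega))]
      exact ih st b hs (by omega)

lemma bubble_eq_aRun (m : Nat) : ∀ (l : List Int) (c : Nat),
    gen_bubble_alt_bubble l c m = aRun (l, c) m := by
  induction m using Nat.strong_induction_on with
  | _ m ih =>
    intro l c
    rw [gen_bubble_alt_bubble]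
    split_ifs with h
    · match m, h with
      | 0, _ => rfl
      | 1, _ => rfl
    · obtain ⟨k, rfl⟩ : ∃ k, m = k + 2 := ⟨m - 2, by omega⟩
      have hcast : ((k + 2 : Nat) : Int) - 1 = ((k + 1 : Nat) : Int) := by push_cast; ring
      rw [hcast, foldB (k + 1) l c false]
      simp only [Bool.false_or]
      by_cases hz : (passN l (k + 1)).2 = 0
      · simp only [hz, decide_eq_true_eq]
        rw [if_neg (by simp)]
        obtain ⟨h1, h2⟩ := pass_no_swap (k + 1) l hz
        show (_, c + 0) = aRun (l, c) (k + 2)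
        rw [aRun, aRun_sorted_id (k + 1) (_, _) (k + 1) (by simpa [h1, hz] using h2) (by omega)]
        simp [h1, hz]
      · rw [if_pos (by simpa using hz)]
        show gen_bubble_alt_bubble _ _ (k + 2 - 1) = _
        have : k + 2 - 1 = k + 1 := by omega
        rw [this, ih (k + 1) (by omega), aRun]

lemma outerA (n : Int) (k : Nat) : ((k : Int) ≤ n - 1) → ∀ (st : List Int × Nat),
    (PySem.List.pyRange (n - 1 - (k : Int)) (n - 1) 1).foldl
      (fun st i => (PySem.List.pyRange 0 (n - 1 - i) 1).foldl gen_bubble_step st) st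
      = aRun st (k + 1) := by
  induction k with
  | zero => intro _ st; simp [PySem.List.pyRange_one_eq_nil, aRun]
  | succ k ih =>
    intro hk st
    rw [PySem.List.pyRange_one_cons (by push_cast; omega)]
    simp only [List.foldl]
    have h1 : n - 1 - (n - 1 - ((k + 1 : Nat) : Int)) = ((k + 1 : Nat) : Int) := by ring
    have h2 : n - 1 - ((k + 1 : Nat) : Int) + 1 = n - 1 - (k : Int) := by push_cast; ring
    rw [h1, h2, foldA (k + 1) st.1 st.2, ih (by push_cast at hk ⊢; omega)]
    rfl

lemma outerA_full (n : Int) (k : Nat) (hk : (k : Int) = n - 1) (st : List Int × Nat) :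
    (PySem.List.pyRange 0 (n - 1) 1).foldl
      (fun st i => (PySem.List.pyRange 0 (n - 1 - i) 1).foldl gen_bubble_step st) st
      = aRun st (k + 1) := by
  rw [show PySem.List.pyRange 0 (n - 1) 1 = PySem.List.pyRange (n - 1 - (k : Int)) (n - 1) 1 from
    by rw [show n - 1 - (k : Int) = 0 from by omega]]
  exact outerA n k (by omega) st

-- ===== VERDICT (by name: the statement is the Claim_ definition above) =====
theorem gen_bubble_spec : Claim_equal_gen_bubble := by
  intro arr _
  unfold Spec_gen_bubble gen_bubble gen_bubble_alt
  simp only []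
  by_cases h : (arr.length : Int) ≤ 1
  · rw [if_pos h, if_pos (by exact_mod_cast h)]
  · rw [if_neg h, if_neg (by omega)]
    have hN : 2 ≤ arr.length := by omega
    rw [bubble_eq_aRun,
      outerA_full (arr.length : Int) (arr.length - 1) (by omega) (arr, 0),
      show arr.length - 1 + 1 = arr.length from by omega]
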